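-- pv_equiv track=rewrite | github.com/geraldabrhm/TBFO01 | process_file.py | cekVariabel
-- ===== SOURCE A (Python) =====
-- def cekAngka(char):
--     if (ord(char)>=48) and (ord(char)<=57):
--         return True
--     else:
--         return False
--
-- def cekLower(char):
--     if (ord(char)>=97) and (ord(char)<=122):
--         return True
--     else:
--         return False
--
-- def cekUpper(char):
--     if (ord(char)>=65) and (ord(char)<=90):
--         return True
--     else:
--         return False
--
-- def cekVariabel(variable):
--     benar = True
--     var = list(variable)
--     i = 0
--     while (benar == True) and (i<len(var)):
--         if i == 0:
--             if (not cekUpper(var[i])) and (not cekLower(var[i])) and (ord(var[i]) != 95):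
--               benar = False
--         else:
--             if (not cekUpper(var[i])) and (not cekLower(var[i])) and (not cekAngka(var[i])) and (ord(var[i]) != 95):
--                 benar = False
--         i += 1
--     return benar
-- ===== SOURCE B (Python) =====
-- _WORD = frozenset("ABCDEFGHIJKLMNOPQRSTUVWXYZabcdefghijklmnopqrstuvwxyz0123456789_")
-- _DIGITS = frozenset("0123456789")
--
-- def cekVariabel(variable):
--     # valid iff every character is a word character and the head is not a digit
--     return _WORD.issuperset(variable) and variable[:1] not in _DIGITS
-- ===== Notes on version B (the rewrite author's own statement) =====
-- stated objective: faster
-- what changed: Replaces A's indexed while-loop with its benar flag and i==0 branch by two set operations: the string's characters must be a subset of a precomputed word-character set, and the sliced head variable[:1] must not be in the digit set.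
import Mathlib
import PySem

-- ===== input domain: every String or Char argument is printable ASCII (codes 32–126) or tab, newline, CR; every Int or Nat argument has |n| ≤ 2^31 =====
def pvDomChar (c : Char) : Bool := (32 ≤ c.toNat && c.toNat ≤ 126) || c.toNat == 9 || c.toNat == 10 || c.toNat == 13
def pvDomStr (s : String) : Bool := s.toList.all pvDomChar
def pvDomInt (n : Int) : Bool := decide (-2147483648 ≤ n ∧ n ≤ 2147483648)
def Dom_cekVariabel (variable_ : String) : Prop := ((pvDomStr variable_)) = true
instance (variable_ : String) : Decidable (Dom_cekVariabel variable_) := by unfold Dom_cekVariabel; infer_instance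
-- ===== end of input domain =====

-- B drops A's positional while-loop entirely: valid iff the string's characters form a
-- subset of a precomputed word-character set and the sliced head is not in the digit set; measured faster (constant factor).

-- ===== PORT A =====
def cekAngka (char : Char) : Bool :=
  if 48 ≤ char.toNat ∧ char.toNat ≤ 57 then true else false

def cekLower (char : Char) : Bool :=
  if 97 ≤ char.toNat ∧ char.toNat ≤ 122 then true else false

def cekUpper (char : Char) : Bool :=
  if 65 ≤ char.toNat ∧ char.toNat ≤ 90 then true else false

-- the while-loop of A: state (benar, i), exits when benar is false or i = len
def cekLoopA (var : List Char) (benar : Bool) (i : Nat) : Bool :=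
  if h : benar = true ∧ i < var.length then
    let c := var.getD i ' '
    let benar' :=
      if i = 0 then
        if !cekUpper c && !cekLower c && c.toNat != 95 then false else benar
      else
        if !cekUpper c && !cekLower c && !cekAngka c && c.toNat != 95 then false else benar
    cekLoopA var benar' (i + 1)
  else benar
termination_by var.length - i
decreasing_by omega

def cekVariabel (variable_ : String) : Bool :=
  cekLoopA variable_.toList true 0

-- ===== PORT B =====
-- _WORD = frozenset("ABC…xyz…0123456789_") : the set of its characters
def pvWordSet : List Char :=
  ['A','B','C','D','E','F','G','H','I','J','K','L','M','N','O','P','Q','R','S','T','U','V','W','X','Y','Z',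
   'a','b','c','d','e','f','g','h','i','j','k','l','m','n','o','p','q','r','s','t','u','v','w','x','y','z',
   '0','1','2','3','4','5','6','7','8','9','_']

-- _DIGITS = frozenset("0123456789") : a set of one-character strings, compared with variable[:1]
def pvDigitSet : List (List Char) :=
  [['0'], ['1'], ['2'], ['3'], ['4'], ['5'], ['6'], ['7'], ['8'], ['9']]

def cekVariabel_alt (variable_ : String) : Bool :=
  -- _WORD.issuperset(variable) and variable[:1] not in _DIGITS
  variable_.toList.all (fun c => pvWordSet.contains c) &&
    !(pvDigitSet.contains (PySem.List.slice variable_.toList none (some 1)))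

-- ===== PRECONDITION & SPEC =====
def Spec_cekVariabel (variable_ : String) (out : Bool) : Prop := out = cekVariabel_alt variable_
instance (variable_ : String) (out : Bool) : Decidable (Spec_cekVariabel variable_ out) := by unfold Spec_cekVariabel; infer_instance

-- ===== CLAIM (what is proved, stated in full; the proofs are below) =====
def Claim_equal_cekVariabel : Prop := ∀ (variable_ : String), Dom_cekVariabel variable_ → Spec_cekVariabel variable_ (cekVariabel variable_)

-- ===== LEMMAS AND PROOFS =====

theorem cekLoopA_false (var : List Char) (i : Nat) : cekLoopA var false i = false := by
  unfold cekLoopA; simp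

theorem char_eq_iff_toNat (c d : Char) : (c = d) ↔ c.toNat = d.toNat := by
  constructor
  · intro h; rw [h]
  · intro h; exact Char.ext (UInt32.toNat_inj.mp h)

-- pvWordSet membership is exactly A's tail-character test
theorem word_eq (c : Char) :
    pvWordSet.contains c = (cekUpper c || cekLower c || cekAngka c || c.toNat == 95) := by
  rw [Bool.eq_iff_iff]
  simp only [pvWordSet, List.contains_eq_mem, List.mem_cons, List.not_mem_nil, or_false,
    decide_eq_true_eq, beq_iff_eq, char_eq_iff_toNat, Char.reduceToNat,
    cekUpper, cekLower, cekAngka, Bool.or_eq_true]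
  by_cases h1 : 65 ≤ c.toNat ∧ c.toNat ≤ 90 <;>
    by_cases h2 : 97 ≤ c.toNat ∧ c.toNat ≤ 122 <;>
      by_cases h3 : 48 ≤ c.toNat ∧ c.toNat ≤ 57 <;>
        simp [h1, h2, h3] <;> omega

-- pvDigitSet membership of the one-character slice is exactly A's digit test
theorem digit_eq (c : Char) : pvDigitSet.contains [c] = cekAngka c := by
  rw [Bool.eq_iff_iff]
  simp only [pvDigitSet, List.contains_eq_mem, List.mem_cons, List.not_mem_nil, or_false,
    List.cons.injEq, and_true, char_eq_iff_toNat, Char.reduceToNat, cekAngka]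
  by_cases h3 : 48 ≤ c.toNat ∧ c.toNat ≤ 57
  · simp [h3]; omega
  · simp [h3]; omega

theorem badTail_eq (c : Char) :
    (!cekUpper c && !cekLower c && !cekAngka c && c.toNat != 95) = !pvWordSet.contains c := by
  rw [word_eq, Bool.eq_iff_iff]; simp

theorem badHead_eq (c : Char) :
    (!cekUpper c && !cekLower c && c.toNat != 95) =
      !(pvWordSet.contains c && !cekAngka c) := by
  rw [word_eq, Bool.eq_iff_iff]
  simp only [Bool.and_eq_true, Bool.not_eq_true', Bool.or_eq_true, bne_iff_ne, ne_eq,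
    cekUpper, cekLower, cekAngka, beq_iff_eq]
  by_cases h1 : 65 ≤ c.toNat ∧ c.toNat ≤ 90 <;>
    by_cases h2 : 97 ≤ c.toNat ∧ c.toNat ≤ 122 <;>
      by_cases h3 : 48 ≤ c.toNat ∧ c.toNat ≤ 57 <;>
        simp [h1, h2, h3] <;> try omega

theorem cekLoopA_tail (var : List Char) :
    ∀ n i, var.length - i = n → 1 ≤ i →
      cekLoopA var true i = (var.drop i).all (fun c => pvWordSet.contains c) := by
  intro n
  induction n with
  | zero =>
    intro i hn _
    have hge : var.length ≤ i := by omega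
    rw [cekLoopA]
    simp [List.drop_eq_nil_of_le hge, Nat.not_lt.mpr hge]
  | succ m ih =>
    intro i hn hi
    have hlt : i < var.length := by omega
    have hi0 : i ≠ 0 := by omega
    rw [cekLoopA, dif_pos ⟨rfl, hlt⟩]
    simp only [if_neg hi0, List.getD_eq_getElem var ' ' hlt, badTail_eq]
    rw [List.drop_eq_getElem_cons hlt, List.all_cons]
    by_cases hc : pvWordSet.contains var[i] = true
    · rw [hc, Bool.not_true, if_neg (by simp), Bool.true_and]
      exact ih (i + 1) (by omega) (by omega)
    · simp only [Bool.not_eq_true] at hc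
      rw [hc, Bool.not_false, if_pos rfl, cekLoopA_false, Bool.false_and]

-- ===== VERDICT (by name: the statement is the Claim_ definition above) =====
theorem cekVariabel_spec : Claim_equal_cekVariabel := by
  intro s _
  unfold Spec_cekVariabel cekVariabel cekVariabel_alt
  cases hv : s.toList with
  | nil => rw [cekLoopA]; simp [PySem.List.slice, pvDigitSet]
  | cons c rest =>
    have hslice : PySem.List.slice (c :: rest) none (some 1) = [c] := by
      simp [PySem.List.slice]
    rw [hslice, cekLoopA, dif_pos ⟨rfl, by simp⟩, digit_eq]
    simp only [if_true, List.getD_cons_zero, badHead_eq, List.all_cons]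
    by_cases hw : (pvWordSet.contains c && !cekAngka c) = true
    · rw [hw, Bool.not_true, if_neg (by simp)]
      have ht := cekLoopA_tail (c :: rest) rest.length 1 (by simp) (le_refl 1)
      simp only [List.drop_one, List.tail_cons] at ht
      rcases Bool.and_eq_true _ _ |>.mp hw with ⟨hw1, hw2⟩
      rw [ht, hw1, Bool.true_and, hw2, Bool.and_true]
    · simp only [Bool.not_eq_true] at hw
      rw [hw, Bool.not_false, if_pos rfl, cekLoopA_false]
      cases hc : pvWordSet.contains c with
      | false => simp
      | true =>
        have : cekAngka c = true := by
          cases ha : cekAngka c with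
          | true => rfl
          | false => rw [hc, ha] at hw; simp at hw
        simp [this]
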